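-- pv_equiv track=rewrite | github.com/distbit0/newsToPriceCorrelator | wordInfluencePredictor.py | categorizePosts
-- ===== SOURCE A (Python) =====
-- def categorizePosts(posts, coinNames):
--    import json
--    categorizedPosts = {}
--    for post in posts:
--       coins = [coinName for coinName in coinNames if coinName in post]
--       if len(coins) == 1:
--          coin = coins[0]
--          if not coin in categorizedPosts.keys():
--             categorizedPosts[coin] = {}
--          if not posts[post] in categorizedPosts[coin]:
--             categorizedPosts[coin][posts[post]] = []
--          categorizedPosts[coin][posts[post]].append(post)
--    return categorizedPosts
-- ===== SOURCE B (Python) =====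
-- def categorizePosts(posts, coinNames):
--     # pass 1, coin-major: for each coin, tally every post containing it and
--     # remember the most recent matching coin per post
--     matchCount = {}
--     matchedCoin = {}
--     for coin in coinNames:
--         for post in posts:
--             if coin in post:
--                 matchCount[post] = matchCount.get(post, 0) + 1
--                 matchedCoin[post] = coin
--     # pass 2: group the uniquely-matched posts
--     categorized = {}
--     for post in posts:
--         if matchCount.get(post, 0) == 1:
--             coin = matchedCoin[post]
--             categorized.setdefault(coin, {}).setdefault(posts[post], []).append(post)
--     return categorized
-- ===== Notes on version B (the rewrite author's own statement) =====
-- stated objective: alternative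
-- what changed: B inverts the loop nest and stages the work: a coin-major first pass tallies, per post, how many coins it contains (and the most recent matching coin) into two dicts, then a second pass over the posts groups exactly those with tally 1; A instead does one post-major pass that filters the whole coin list per post and builds the nested dict with conditional initialisations.
import Mathlib
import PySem

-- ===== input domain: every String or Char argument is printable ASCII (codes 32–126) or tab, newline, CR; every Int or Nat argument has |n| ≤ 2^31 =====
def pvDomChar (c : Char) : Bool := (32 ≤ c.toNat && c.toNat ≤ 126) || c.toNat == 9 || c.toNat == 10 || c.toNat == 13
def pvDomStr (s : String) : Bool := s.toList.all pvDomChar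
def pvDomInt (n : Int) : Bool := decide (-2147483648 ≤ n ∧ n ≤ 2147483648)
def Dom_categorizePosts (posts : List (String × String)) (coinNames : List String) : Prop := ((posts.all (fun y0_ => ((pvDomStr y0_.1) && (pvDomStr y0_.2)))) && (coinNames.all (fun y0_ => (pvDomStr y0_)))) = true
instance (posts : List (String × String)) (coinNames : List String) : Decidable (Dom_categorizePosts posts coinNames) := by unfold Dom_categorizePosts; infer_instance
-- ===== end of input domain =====

-- B inverts the loop nest into a coin-major counting pass (two flat dicts) followed by a grouping
-- pass over the posts; same results, same asymptotic cost. The 'posts' dict parameter is modelled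
-- as PySem.Dict built from the association list.

-- ===== PORT A =====
-- one loop step of A: classify the post, then the three-step conditional dict building
def pvStepA (coinNames : List String)
    (acc : PySem.Dict String (PySem.Dict String (List String)))
    (pv : String × String) : PySem.Dict String (PySem.Dict String (List String)) :=
  let post := pv.1
  let coins := coinNames.filter (fun c => PySem.Str.isIn c post)
  if coins.length = 1 then
    let coin := coins.headD ""
    let acc := if acc.contains coin then acc else acc.insert coin PySem.Dict.empty
    let inner := acc.getD coin PySem.Dict.empty
    let inner := if inner.contains pv.2 then inner else inner.insert pv.2 []
    let lst := inner.getD pv.2 []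
    acc.insert coin (inner.insert pv.2 (lst ++ [post]))
  else acc

def categorizePosts (posts : List (String × String)) (coinNames : List String) :
    List (String × List (String × List String)) :=
  let d := PySem.Dict.ofList posts
  ((d.items.foldl (pvStepA coinNames) PySem.Dict.empty).items.map (fun p => (p.1, p.2.items)))

-- ===== PORT B =====
-- pass-1 inner step: one post against the current coin (tally + remember the coin)
def pvCountStep (c : String)
    (st : PySem.Dict String Int × PySem.Dict String String)
    (pv : String × String) : PySem.Dict String Int × PySem.Dict String String :=
  if PySem.Str.isIn c pv.1 then
    (st.1.insert pv.1 (st.1.getD pv.1 0 + 1), st.2.insert pv.1 c)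
  else st

-- pass-2 step: group a uniquely-matched post under its remembered coin
def pvGroupStep (st : PySem.Dict String Int × PySem.Dict String String)
    (acc : PySem.Dict String (PySem.Dict String (List String)))
    (pv : String × String) : PySem.Dict String (PySem.Dict String (List String)) :=
  if st.1.getD pv.1 0 = 1 then
    let coin := st.2.getD pv.1 ""
    let inner := acc.getD coin PySem.Dict.empty
    acc.insert coin (inner.insert pv.2 (inner.getD pv.2 [] ++ [pv.1]))
  else acc

def categorizePosts_alt (posts : List (String × String)) (coinNames : List String) :
    List (String × List (String × List String)) :=
  let d := PySem.Dict.ofList posts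
  let st := coinNames.foldl (fun st c => d.items.foldl (pvCountStep c) st)
    (PySem.Dict.empty, PySem.Dict.empty)
  ((d.items.foldl (pvGroupStep st) PySem.Dict.empty).items.map (fun p => (p.1, p.2.items)))

-- ===== PRECONDITION & SPEC =====
def Spec_categorizePosts (posts : List (String × String)) (coinNames : List String) (out : List (String × List (String × List String))) : Prop := out = categorizePosts_alt posts coinNames
instance (posts : List (String × String)) (coinNames : List String) (out : List (String × List (String × List String))) : Decidable (Spec_categorizePosts posts coinNames out) := by unfold Spec_categorizePosts; infer_instance

-- ===== CLAIM (what is proved, stated in full; the proofs are below) =====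
def Claim_equal_categorizePosts : Prop := ∀ (posts : List (String × String)) (coinNames : List String), Dom_categorizePosts posts coinNames → Spec_categorizePosts posts coinNames (categorizePosts posts coinNames)

-- ===== LEMMAS AND PROOFS =====

-- the coin of the LAST element of cs that post k contains (none if no match)
def pvLastMatch (k : String) : List String → Option String
  | [] => none
  | c :: cs => (pvLastMatch k cs).or (if PySem.Str.isIn c k then some c else none)

-- the fold never changes the remembered coin at a key that does not occur in l
theorem pvFold_mc_untouched (c k : String) (l : List (String × String))
    (st : PySem.Dict String Int × PySem.Dict String String)
    (h : k ∉ l.map Prod.fst) :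
    (l.foldl (pvCountStep c) st).2.get? k = st.2.get? k := by
  induction l generalizing st with
  | nil => rfl
  | cons p rest ih =>
    have hpk : ¬ k = p.1 := fun he => h (by simp [he])
    simp only [List.foldl_cons, pvCountStep]
    rw [ih _ (fun hm => h (by simp [hm]))]
    by_cases hm : PySem.Str.isIn c p.1 = true
    · rw [if_pos hm]
      rw [PySem.Dict.get?_insert, if_neg hpk]
    · rw [if_neg hm]

-- pass-1 inner loop: the tally at key k grows by (occurrences of k) when the coin matches k
theorem pvInner_cnt (c k : String) (l : List (String × String))
    (st : PySem.Dict String Int × PySem.Dict String String) :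
    (l.foldl (pvCountStep c) st).1.getD k 0 =
      st.1.getD k 0 + (if PySem.Str.isIn c k then ((l.map Prod.fst).count k : Int) else 0) := by
  induction l generalizing st with
  | nil => simp
  | cons p rest ih =>
    simp only [List.foldl_cons, pvCountStep, List.map_cons]
    by_cases hm : PySem.Str.isIn c p.1 = true
    · rw [if_pos hm, ih]
      by_cases hpk : p.1 = k
      · subst hpk
        rw [PySem.Dict.getD_insert_self, if_pos hm, if_pos hm]
        rw [List.count_cons_self]
        push_cast
        ring
      · rw [PySem.Dict.getD_insert, if_neg (fun he => hpk he.symm)]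
        have : (p.1 :: rest.map Prod.fst).count k = (rest.map Prod.fst).count k := by
          simp [hpk]
        rw [this]
    · rw [if_neg hm, ih]
      by_cases hpk : p.1 = k
      · subst hpk
        rw [if_neg hm, if_neg hm]
      · have : (p.1 :: rest.map Prod.fst).count k = (rest.map Prod.fst).count k := by
          simp [hpk]
        rw [this]

-- pass-1 inner loop: the remembered coin at a key that occurs in l
theorem pvInner_mc (c k : String) (l : List (String × String))
    (st : PySem.Dict String Int × PySem.Dict String String)
    (hk : k ∈ l.map Prod.fst) :
    (l.foldl (pvCountStep c) st).2.get? k =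
      if PySem.Str.isIn c k then some c else st.2.get? k := by
  induction l generalizing st with
  | nil => simp at hk
  | cons p rest ih =>
    simp only [List.foldl_cons, pvCountStep]
    by_cases hr : k ∈ rest.map Prod.fst
    · rw [ih _ hr]
      by_cases hck : PySem.Str.isIn c k = true
      · rw [if_pos hck, if_pos hck]
      · rw [if_neg hck, if_neg hck]
        by_cases hm : PySem.Str.isIn c p.1 = true
        · have hpk : ¬ k = p.1 := fun he => hck (he ▸ hm)
          rw [if_pos hm, PySem.Dict.get?_insert, if_neg hpk]
        · rw [if_neg hm]
    · have hpk : p.1 = k := by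
        simp only [List.map_cons, List.mem_cons] at hk
        tauto
      subst hpk
      rw [pvFold_mc_untouched c p.1 rest _ hr]
      by_cases hm : PySem.Str.isIn c p.1 = true
      · rw [if_pos hm, if_pos hm, PySem.Dict.get?_insert_self]
      · rw [if_neg hm, if_neg hm]

-- pass 1 over all coins: the tally at k is (occurrences of k) * (matching coins)
theorem pvPass1_cnt (k : String) (cs : List String) (l : List (String × String))
    (st : PySem.Dict String Int × PySem.Dict String String) :
    ((cs.foldl (fun st c => l.foldl (pvCountStep c) st) st).1.getD k 0) =
      st.1.getD k 0 +
        ((l.map Prod.fst).count k : Int) * ((cs.filter (fun c => PySem.Str.isIn c k)).length : Int) := by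
  induction cs generalizing st with
  | nil => simp
  | cons c cs ih =>
    simp only [List.foldl_cons]
    rw [ih, pvInner_cnt]
    by_cases hm : PySem.Chars.isIn c.toList k.toList = true <;>
      simp only [PySem.Str.isIn, hm, if_pos, if_neg, List.filter_cons, Bool.not_eq_true,
        List.length_cons] <;> push_cast <;> ring

-- pass 1 over all coins: the remembered coin at an occurring key is the last matching coin
theorem pvPass1_mc (k : String) (cs : List String) (l : List (String × String))
    (st : PySem.Dict String Int × PySem.Dict String String)
    (hk : k ∈ l.map Prod.fst) :
    ((cs.foldl (fun st c => l.foldl (pvCountStep c) st) st).2.get? k) =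
      (pvLastMatch k cs).or (st.2.get? k) := by
  induction cs generalizing st with
  | nil => simp [pvLastMatch]
  | cons c cs ih =>
    simp only [List.foldl_cons]
    rw [ih, pvInner_mc c k l st hk, pvLastMatch]
    by_cases hm : PySem.Chars.isIn c.toList k.toList = true <;>
      simp [PySem.Str.isIn, hm]

theorem pvLastMatch_nil (k : String) (cs : List String)
    (h : cs.filter (fun c => PySem.Str.isIn c k) = []) : pvLastMatch k cs = none := by
  induction cs with
  | nil => rfl
  | cons c cs ih =>
    rw [List.filter_cons] at h
    by_cases hm : PySem.Chars.isIn c.toList k.toList = true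
    · simp [PySem.Str.isIn, hm] at h
    · simp only [PySem.Str.isIn, hm, Bool.false_eq_true, ite_false] at h
      simp [pvLastMatch, ih h, PySem.Str.isIn, hm]

theorem pvLastMatch_singleton (k c0 : String) (cs : List String)
    (h : cs.filter (fun c => PySem.Str.isIn c k) = [c0]) : pvLastMatch k cs = some c0 := by
  induction cs with
  | nil => simp at h
  | cons c cs ih =>
    rw [List.filter_cons] at h
    by_cases hm : PySem.Chars.isIn c.toList k.toList = true
    · simp only [PySem.Str.isIn, hm, ite_true] at h
      have hc : c = c0 := by simpa using congrArg List.head? h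
      subst hc
      have htl : cs.filter (fun c => PySem.Str.isIn c k) = [] := by
        simpa using congrArg List.tail h
      simp [pvLastMatch, pvLastMatch_nil k cs htl, PySem.Str.isIn, hm]
    · simp only [PySem.Str.isIn, hm, Bool.false_eq_true, ite_false] at h
      simp [pvLastMatch, ih h, PySem.Str.isIn, hm]

-- the two grouping steps agree on every item of a nodup-keyed post list
theorem pvStep_eq (coinNames : List String) (l : List (String × String))
    (hnd : (l.map Prod.fst).Nodup)
    (acc : PySem.Dict String (PySem.Dict String (List String)))
    (pv : String × String) (hpv : pv ∈ l) :
    pvStepA coinNames acc pv =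
      pvGroupStep
        (coinNames.foldl (fun st c => l.foldl (pvCountStep c) st)
          (PySem.Dict.empty, PySem.Dict.empty)) acc pv := by
  have hk : pv.1 ∈ l.map Prod.fst := List.mem_map_of_mem hpv
  have hocc : (l.map Prod.fst).count pv.1 = 1 := List.count_eq_one_of_mem hnd hk
  set st := coinNames.foldl (fun st c => l.foldl (pvCountStep c) st)
    (PySem.Dict.empty, PySem.Dict.empty) with hst
  set flt := coinNames.filter (fun c => PySem.Str.isIn c pv.1) with hflt
  have hcnt : st.1.getD pv.1 0 = (flt.length : Int) := by
    rw [hst, pvPass1_cnt, hocc]; simp [hflt, PySem.Str.isIn]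
  simp only [pvStepA, pvGroupStep, ← hflt, hcnt]
  by_cases h'' : flt.length = 1
  · obtain ⟨c0, hc0⟩ : ∃ c0, flt = [c0] := List.length_eq_one_iff.mp h''
    have hmc : st.2.get? pv.1 = some c0 := by
      rw [hst, pvPass1_mc pv.1 coinNames l _ hk,
        pvLastMatch_singleton pv.1 c0 coinNames (hflt ▸ hc0)]
      rfl
    have hcoin : st.2.getD pv.1 "" = c0 := PySem.Dict.getD_of_get?_eq_some _ _ hmc
    have hlen : ((flt.length : Int) = 1) := by exact_mod_cast h''
    rw [if_pos hlen]
    simp only [hcoin, hc0, List.headD]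
    rw [if_pos (show ([c0] : List String).length = 1 from rfl)]
    -- A's conditional-initialisation chain collapses to B's single insert
    by_cases hc : acc.contains c0 = true
    · rw [if_pos hc]
      by_cases hv : (acc.getD c0 PySem.Dict.empty).contains pv.2 = true
      · rw [if_pos hv]
      · have e1 : (acc.getD c0 PySem.Dict.empty).getD pv.2 [] = [] :=
          PySem.Dict.getD_of_not_contains _ _ (by simpa using hv)
        rw [if_neg hv, PySem.Dict.getD_insert_self, PySem.Dict.insert_insert_self, e1]
    · have hemp : ¬ (PySem.Dict.empty : PySem.Dict String (List String)).contains pv.2 = true := by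
        simp [PySem.Dict.contains_empty]
      have e2 : acc.getD c0 PySem.Dict.empty = PySem.Dict.empty :=
        PySem.Dict.getD_of_not_contains _ _ (by simpa using hc)
      rw [if_neg hc, PySem.Dict.getD_insert_self, if_neg hemp, PySem.Dict.getD_insert_self,
        PySem.Dict.insert_insert_self, PySem.Dict.insert_insert_self, e2, PySem.Dict.getD_empty]
  · have hlen : ¬ ((flt.length : Int) = 1) := by exact_mod_cast h''
    rw [if_neg h'', if_neg hlen]

-- ===== VERDICT (by name: the statement is the Claim_ definition above) =====
theorem categorizePosts_spec : Claim_equal_categorizePosts := by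
  intro posts coinNames _
  show categorizePosts posts coinNames = categorizePosts_alt posts coinNames
  unfold categorizePosts categorizePosts_alt
  have hnd : ((PySem.Dict.ofList posts).items.map Prod.fst).Nodup :=
    PySem.Dict.nodup_keys_ofList posts
  exact congrArg
    (fun d : PySem.Dict String (PySem.Dict String (List String)) =>
      d.items.map (fun p => (p.1, p.2.items)))
    (PySem.List.foldl_congr_mem (PySem.Dict.ofList posts).items _ _ PySem.Dict.empty
      (fun acc pv hpv =>
        pvStep_eq coinNames (PySem.Dict.ofList posts).items hnd acc pv hpv))
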